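-- pv_equiv track=rewrite | github.com/sashank-pavani/16-Bit-Relay | Robo_FIT/GenericLibraries/GenericOpLibs/iVision/iVision_Img/IvisionImg.py | get_on_off_sequences
-- ===== SOURCE A (Python) =====
-- def get_on_off_sequences(files, match_results):
--     """
--     Identifies ON and OFF sequences based on template match results.
--
--     Returns two lists of tuples: ON sequences and OFF sequences with their start and end indices.
--     """
--     try:
--         on_sequences = []
--         off_sequences = []
--         in_on = False
--         in_off = False
--         current_on_start = None
--         current_off_start = None
--
--         for i, f in enumerate(files):
--             match = match_results[f]
--             if match:
--                 if not in_on: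
--                     current_on_start = i
--                     in_on = True
--                     if in_off:
--                         off_sequences.append((current_off_start, i - 1))
--                         in_off = False
--             else:
--                 if not in_off:
--                     current_off_start = i
--                     in_off = True
--                     if in_on:
--                         on_sequences.append((current_on_start, i - 1))
--                         in_on = False
--
--         if in_on:
--             on_sequences.append((current_on_start, len(files) - 1))
--         if in_off:
--             off_sequences.append((current_off_start, len(files) - 1))
--
--         return on_sequences, off_sequences
--     except Exception as e:
--         robot_print_info(f"Error in get_on_off_sequences: {e}")
--         return [], []
-- ===== SOURCE B (Python) =====
-- def get_on_off_sequences(files, match_results):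
--     """
--     Identifies ON and OFF sequences based on template match results.
--
--     Two-pointer run scan: for each maximal run of equal match value, find its
--     end directly and append (start, end) to the proper list. No state flags,
--     no trailing flush. Raises KeyError (instead of A's blanket except that
--     calls an undefined logger) when a file is missing from match_results.
--     """
--     on_sequences = []
--     off_sequences = []
--     n = len(files)
--     i = 0
--     while i < n:
--         key = bool(match_results[files[i]])
--         j = i + 1
--         while j < n and bool(match_results[files[j]]) == key:
--             j += 1
--         (on_sequences if key else off_sequences).append((i, j - 1))
--         i = j
--     return on_sequences, off_sequences
-- ===== Notes on version B (the rewrite author's own statement) =====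
-- stated objective: simpler
-- what changed: Replaced A's in_on/in_off flag state machine (with trailing flush and per-transition bookkeeping) by a two-pointer scan that finds each maximal run of equal match value directly and appends its (start, end); B drops A's blanket try/except, which cannot return anyway because its handler calls an undefined logger.
import Mathlib
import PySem

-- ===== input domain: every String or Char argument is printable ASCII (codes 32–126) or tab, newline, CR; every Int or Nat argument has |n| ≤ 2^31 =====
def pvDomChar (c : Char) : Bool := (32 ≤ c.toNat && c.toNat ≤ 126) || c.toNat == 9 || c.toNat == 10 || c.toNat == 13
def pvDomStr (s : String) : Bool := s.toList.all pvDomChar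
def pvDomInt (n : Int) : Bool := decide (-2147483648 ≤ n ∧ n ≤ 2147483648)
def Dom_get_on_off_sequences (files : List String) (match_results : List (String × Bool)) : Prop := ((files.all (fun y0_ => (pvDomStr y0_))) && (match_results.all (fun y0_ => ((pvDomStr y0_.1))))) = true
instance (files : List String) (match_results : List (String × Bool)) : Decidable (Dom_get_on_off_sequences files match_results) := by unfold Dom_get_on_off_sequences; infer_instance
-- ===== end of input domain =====

-- B replaces A's in_on/in_off flag state machine by a direct two-pointer scan of
-- maximal runs (objective: simpler); equivalence is about the return value on
-- inputs whose files all occur in match_results (A raises NameError otherwise,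
-- its except-handler calling an undefined logger).

-- ===== PORT A =====
structure AState where
  onS : List (Int × Int)
  offS : List (Int × Int)
  inOn : Bool
  inOff : Bool
  curOn : Option Int   -- Python's current_on_start (None before first ON run)
  curOff : Option Int
deriving Repr, DecidableEq

-- one body of A's for-loop; `.getD 0` is only reached with the flag set, where Python holds an int
def stepA (st : AState) (i : Int) (m : Bool) : AState :=
  if m then
    if !st.inOn then
      let st1 : AState := { st with curOn := some i, inOn := true }
      if st1.inOff then
        { st1 with offS := st1.offS ++ [(st1.curOff.getD 0, i - 1)], inOff := false }
      else st1
    else st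
  else
    if !st.inOff then
      let st1 : AState := { st with curOff := some i, inOff := true }
      if st1.inOn then
        { st1 with onS := st1.onS ++ [(st1.curOn.getD 0, i - 1)], inOn := false }
      else st1
    else st

-- A's for-loop over enumerate(files); none = the KeyError Python raises on match_results[f]
def aLoop (d : PySem.Dict String Bool) (i : Int) (st : AState) : List String → Option AState
  | [] => some st
  | f :: rest =>
    match PySem.Dict.get? d f with
    | none => none
    | some m => aLoop d (i + 1) (stepA st i m) rest

-- A's trailing flush of an open run
def finA (st : AState) (last : Int) : (List (Int × Int)) × (List (Int × Int)) :=
  ((if st.inOn then st.onS ++ [(st.curOn.getD 0, last)] else st.onS),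
   (if st.inOff then st.offS ++ [(st.curOff.getD 0, last)] else st.offS))

-- loop then flush; the none branch is the KeyError path, excluded by Pre_ (A's
-- except-handler calls an undefined robot_print_info, so Python A raises NameError there)
def runA (d : PySem.Dict String Bool) (i : Int) (st : AState) (l : List String) (last : Int) :
    (List (Int × Int)) × (List (Int × Int)) :=
  match aLoop d i st l with
  | none => ([], [])
  | some st => finA st last

def get_on_off_sequences (files : List String) (match_results : List (String × Bool)) :
    (List (Int × Int)) × (List (Int × Int)) :=
  runA (PySem.Dict.ofList match_results) 0 ⟨[], [], false, false, none, none⟩ files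
    ((files.length : Int) - 1)

-- ===== PORT B =====
-- bool(match_results[f]); on Pre_ the lookup succeeds (Python B raises KeyError outside Pre_)
def kf (d : PySem.Dict String Bool) (f : String) : Bool := (PySem.Dict.get? d f).getD false

-- B's inner while: advance j past the elements extending the current run, return (j, remaining)
def scanRun (d : PySem.Dict String Bool) (k : Bool) (j : Int) : List String → Int × List String
  | [] => (j, [])
  | f :: rest => if kf d f == k then scanRun d k (j + 1) rest else (j, f :: rest)

lemma scanRun_len (d : PySem.Dict String Bool) (k : Bool) :
    ∀ (j : Int) (l : List String), (scanRun d k j l).2.length ≤ l.length := by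
  intro j l
  induction l generalizing j with
  | nil => simp [scanRun]
  | cons f rest ih =>
    simp only [scanRun]
    split
    · exact (ih (j + 1)).trans (by simp)
    · simp

-- B's outer while: one maximal run per iteration
def bLoop (d : PySem.Dict String Bool) (i : Int) (onS offS : List (Int × Int)) :
    List String → (List (Int × Int)) × (List (Int × Int))
  | [] => (onS, offS)
  | f :: rest =>
    let k := kf d f
    let p := scanRun d k (i + 1) rest
    if k then bLoop d p.1 (onS ++ [(i, p.1 - 1)]) offS p.2
    else bLoop d p.1 onS (offS ++ [(i, p.1 - 1)]) p.2
termination_by l => l.length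
decreasing_by
  all_goals exact Nat.lt_succ_of_le (scanRun_len d (kf d f) (i + 1) rest)

def get_on_off_sequences_alt (files : List String) (match_results : List (String × Bool)) :
    (List (Int × Int)) × (List (Int × Int)) :=
  bLoop (PySem.Dict.ofList match_results) 0 [] [] files

-- ===== PRECONDITION & SPEC =====
-- Pre_ excludes exactly the inputs on which Python A raises: some file missing from
-- match_results (the KeyError is caught but the handler calls undefined robot_print_info → NameError).
def Pre_get_on_off_sequences (files : List String) (match_results : List (String × Bool)) : Prop :=
  ∀ f ∈ files, ((PySem.Dict.ofList match_results).get? f).isSome = true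
instance (files : List String) (match_results : List (String × Bool)) : Decidable (Pre_get_on_off_sequences files match_results) := by unfold Pre_get_on_off_sequences; infer_instance

def pvWitness_get_on_off_sequences : List String × (List (String × Bool)) :=
  (["a", "b", "b", "a"], [("a", true), ("b", false)])

def Spec_get_on_off_sequences (files : List String) (match_results : List (String × Bool)) (out : (List (Int × Int)) × (List (Int × Int))) : Prop := out = get_on_off_sequences_alt files match_results
instance (files : List String) (match_results : List (String × Bool)) (out : (List (Int × Int)) × (List (Int × Int))) : Decidable (Spec_get_on_off_sequences files match_results out) := by unfold Spec_get_on_off_sequences; infer_instance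

-- ===== CLAIM (what is proved, stated in full; the proofs are below) =====
def Claim_equal_get_on_off_sequences : Prop := ∀ (files : List String) (match_results : List (String × Bool)), Dom_get_on_off_sequences files match_results → Pre_get_on_off_sequences files match_results → Spec_get_on_off_sequences files match_results (get_on_off_sequences files match_results)

-- ===== LEMMAS AND PROOFS =====

-- one-step unfoldings of the two loops
lemma runA_cons (d : PySem.Dict String Bool) (i : Int) (st : AState) (f : String)
    (rest : List String) (last : Int) (m : Bool) (hm : d.get? f = some m) :
    runA d i st (f :: rest) last = runA d (i + 1) (stepA st i m) rest last := by
  simp [runA, aLoop, hm]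

lemma bLoop_cons (d : PySem.Dict String Bool) (i : Int) (onS offS : List (Int × Int))
    (f : String) (rest : List String) :
    bLoop d i onS offS (f :: rest)
      = (if kf d f then
           bLoop d (scanRun d (kf d f) (i + 1) rest).1 (onS ++ [(i, (scanRun d (kf d f) (i + 1) rest).1 - 1)]) offS (scanRun d (kf d f) (i + 1) rest).2
         else
           bLoop d (scanRun d (kf d f) (i + 1) rest).1 onS (offS ++ [(i, (scanRun d (kf d f) (i + 1) rest).1 - 1)]) (scanRun d (kf d f) (i + 1) rest).2) := by
  rw [bLoop]

-- within a run (state flags = current key k, start s already recorded), A's loop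
-- run-to-completion equals B's scan of the rest of that run followed by B's outer loop
lemma main_run (d : PySem.Dict String Bool) :
    ∀ (l : List String) (k : Bool) (s e : Int) (onS offS : List (Int × Int)) (cOn cOff : Option Int),
      (∀ f ∈ l, ((d.get? f).isSome = true)) →
      runA d (e + 1)
          ⟨onS, offS, k, !k, (if k then some s else cOn), (if k then cOff else some s)⟩
          l (e + l.length)
        = (if k then
             bLoop d (scanRun d k (e + 1) l).1 (onS ++ [(s, (scanRun d k (e + 1) l).1 - 1)]) offS (scanRun d k (e + 1) l).2
           else
             bLoop d (scanRun d k (e + 1) l).1 onS (offS ++ [(s, (scanRun d k (e + 1) l).1 - 1)]) (scanRun d k (e + 1) l).2) := by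
  intro l
  induction l with
  | nil =>
    intro k s e onS offS cOn cOff _
    cases k <;> simp [runA, aLoop, finA, scanRun, bLoop]
  | cons f rest ih =>
    intro k s e onS offS cOn cOff hall
    have hf : (d.get? f).isSome = true := hall f (by simp)
    obtain ⟨m, hm⟩ := Option.isSome_iff_exists.mp hf
    have hrest : ∀ g ∈ rest, ((d.get? g).isSome = true) := fun g hg => hall g (by simp [hg])
    have hkf : kf d f = m := by simp [kf, hm]
    have hlen : e + (((f :: rest).length : Nat) : Int) = (e + 1) + (rest.length : Int) := by
      simp only [List.length_cons]; push_cast; ring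
    rw [hlen]
    by_cases hmk : m = k
    · -- same key: A's state unchanged, B's inner scan advances
      subst hmk
      have hscan : scanRun d m (e + 1) (f :: rest) = scanRun d m (e + 1 + 1) rest := by
        simp [scanRun, hkf]
      rw [hscan, runA_cons d (e + 1) _ f rest _ m hm]
      have hstep : stepA (⟨onS, offS, m, !m, (if m then some s else cOn), (if m then cOff else some s)⟩ : AState) (e + 1) m
          = ⟨onS, offS, m, !m, (if m then some s else cOn), (if m then cOff else some s)⟩ := by
        cases m <;> simp [stepA]
      rw [hstep]
      exact ih m s (e + 1) onS offS cOn cOff hrest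
    · -- key flips: A closes the run (appending (s, e)), B's outer loop emits the same pair
      have hmk' : m = !k := by revert hmk; cases m <;> cases k <;> decide
      subst hmk'
      cases k with
      | true =>
        have hscan : scanRun d true (e + 1) (f :: rest) = (e + 1, f :: rest) := by
          simp [scanRun, hkf]
        rw [hscan, runA_cons d (e + 1) _ f rest _ (!true) hm]
        have hstep : stepA (⟨onS, offS, true, !true, (if true then some s else cOn), (if true then cOff else some s)⟩ : AState) (e + 1) (!true)
            = ⟨onS ++ [(s, e + 1 - 1)], offS, false, true, some s, some (e + 1)⟩ := by
          simp [stepA]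
        rw [hstep, if_pos rfl, bLoop_cons, hkf]
        have H := ih false (e + 1) (e + 1) (onS ++ [(s, e + 1 - 1)]) offS (some s) cOff hrest
        simpa using H
      | false =>
        have hscan : scanRun d false (e + 1) (f :: rest) = (e + 1, f :: rest) := by
          simp [scanRun, hkf]
        rw [hscan, runA_cons d (e + 1) _ f rest _ (!false) hm]
        have hstep : stepA (⟨onS, offS, false, !false, (if false then some s else cOn), (if false then cOff else some s)⟩ : AState) (e + 1) (!false)
            = ⟨onS, offS ++ [(s, e + 1 - 1)], true, false, some (e + 1), some s⟩ := by
          simp [stepA]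
        rw [hstep, if_neg (by simp : ¬ (false = true)), bLoop_cons, hkf]
        have H := ih true (e + 1) (e + 1) onS (offS ++ [(s, e + 1 - 1)]) cOn (some s) hrest
        simpa using H

-- ===== VERDICT (by name: the statement is the Claim_ definition above) =====
theorem get_on_off_sequences_spec : Claim_equal_get_on_off_sequences := by
  intro files match_results _dom hpre
  unfold Spec_get_on_off_sequences
  cases files with
  | nil =>
    simp [get_on_off_sequences, get_on_off_sequences_alt, runA, aLoop, finA, bLoop]
  | cons f rest =>
    set d := PySem.Dict.ofList match_results with hd
    have hf : (d.get? f).isSome = true := hpre f (by simp)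
    obtain ⟨m, hm⟩ := Option.isSome_iff_exists.mp hf
    have hrest : ∀ g ∈ rest, ((d.get? g).isSome = true) := fun g hg => hpre g (by simp [hg])
    have hkf : kf d f = m := by simp [kf, hm]
    have hlen : (((f :: rest).length : Nat) : Int) - 1 = 0 + (rest.length : Int) := by
      simp only [List.length_cons]; push_cast; ring
    show runA d 0 ⟨[], [], false, false, none, none⟩ (f :: rest) (((f :: rest).length : Int) - 1)
        = bLoop d 0 [] [] (f :: rest)
    rw [hlen, runA_cons d 0 _ f rest _ m hm, bLoop_cons, hkf]
    have hstep : stepA (⟨[], [], false, false, none, none⟩ : AState) 0 m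
        = ⟨[], [], m, !m, (if m then some 0 else none), (if m then none else some 0)⟩ := by
      cases m <;> simp [stepA]
    rw [hstep]
    have H := main_run d rest m 0 0 [] [] none none hrest
    cases m with
    | true => simpa using H
    | false => simpa using H
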